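-- pv_equiv track=rewrite | github.com/marcjduncan-sys/continuum-intelligence-v3 | tools/rba_local_scraper.py | _last_valid_value
-- ===== SOURCE A (Python) =====
-- def _last_valid_value(rows, col_name):
--     """Find the last non-empty value in a column, returning (value, date)."""
--     if not rows:
--         return None, None
--     date_col = None
--     for key in rows[0].keys():
--         lower = key.strip().lower()
--         if lower in ("date", "series id", "title"):
--             date_col = key
--             break
--     if date_col is None:
--         date_col = list(rows[0].keys())[0]
--     for row in reversed(rows):
--         val = row.get(col_name, "").strip()
--         if val and val not in ("", "na", "n/a", "-"):
--             date_str = row.get(date_col, "").strip() if date_col else ""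
--             return val, date_str
--     return None, None
-- ===== SOURCE B (Python) =====
-- def _last_valid_value(rows, col_name):
--     """Find the last non-empty value in a column, returning (value, date).
--
--     Forward pass keeping a running 'last valid seen' accumulator instead of
--     reversing the rows and returning early."""
--     if not rows:
--         return None, None
--     keys = list(rows[0].keys())
--     date_col = next((k for k in keys
--                      if k.strip().lower() in ("date", "series id", "title")),
--                     keys[0])
--     result = (None, None)
--     for row in rows:
--         val = row.get(col_name, "").strip()
--         if val not in ("", "na", "n/a", "-"):
--             result = (val, row.get(date_col, "").strip() if date_col else "")
--     return result
-- ===== Notes on version B (the rewrite author's own statement) =====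
-- stated objective: alternative
-- what changed: Replaces the reversed-iteration with early return by a single forward pass that keeps a running 'last valid (value, date) seen' accumulator, and replaces the key-search loop with a next() over the keys.
import Mathlib
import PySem

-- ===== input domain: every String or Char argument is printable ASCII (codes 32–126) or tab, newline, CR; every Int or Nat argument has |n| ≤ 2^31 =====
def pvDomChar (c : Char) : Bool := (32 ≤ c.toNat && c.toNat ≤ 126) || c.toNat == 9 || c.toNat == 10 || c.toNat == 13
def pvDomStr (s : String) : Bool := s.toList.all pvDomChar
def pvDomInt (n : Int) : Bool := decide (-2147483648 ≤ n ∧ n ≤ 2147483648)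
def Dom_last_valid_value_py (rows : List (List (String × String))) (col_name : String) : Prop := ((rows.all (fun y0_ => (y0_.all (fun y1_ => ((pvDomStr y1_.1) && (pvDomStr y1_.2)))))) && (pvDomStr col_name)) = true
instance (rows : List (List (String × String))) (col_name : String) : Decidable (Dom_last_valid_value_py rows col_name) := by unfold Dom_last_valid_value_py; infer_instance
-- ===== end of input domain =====

-- B replaces A's reversed scan with early return by a forward pass keeping a
-- running 'last valid (value, date) seen' accumulator (objective: alternative).

-- helper shared by both ports: key.strip().lower() in ("date", "series id", "title")
def pvPredDate (k : String) : Bool :=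
  let lower := PySem.Str.lower (PySem.Str.strip k)
  lower == "date" || lower == "series id" || lower == "title"

-- ===== PORT A =====
-- A's first loop: for key in keys: if …: date_col = key; break
def findDateColA : List String → Option String
  | [] => none
  | k :: rest => if pvPredDate k then some k else findDateColA rest

-- A's second loop: for row in reversed(rows): … return val, date_str
def aLoop {α : Type} (c : α → Bool) (f : α → Option String × Option String) :
    List α → Option String × Option String
  | [] => (none, none)
  | r :: rest => if c r then f r else aLoop c f rest

def last_valid_value_py (rows : List (List (String × String))) (col_name : String) : Option String × Option String :=
  match rows with
  | [] => (none, none)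
  | r0 :: _ =>
    let keys := (PySem.Dict.ofList r0).keys
    let date_col : Option String :=
      match findDateColA keys with
      | some k => some k
      | none => PySem.List.pyGet? keys 0   -- list(rows[0].keys())[0]; none = IndexError, excluded by Pre_
    match date_col with
    | none => (none, none)      -- unreachable under Pre_ (Python raises IndexError)
    | some dc =>
      aLoop
        (fun row =>
          let val := PySem.Str.strip ((PySem.Dict.ofList row).getD col_name "")
          val != "" && !(val == "" || val == "na" || val == "n/a" || val == "-"))
        (fun row =>
          let val := PySem.Str.strip ((PySem.Dict.ofList row).getD col_name "")
          (some val, some (if dc != "" then PySem.Str.strip ((PySem.Dict.ofList row).getD dc "") else "")))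
        rows.reverse

-- ===== PORT B =====
def last_valid_value_py_alt (rows : List (List (String × String))) (col_name : String) : Option String × Option String :=
  match rows with
  | [] => (none, none)
  | r0 :: _ =>
    let keys := (PySem.Dict.ofList r0).keys
    match keys with
    | [] => (none, none)        -- unreachable under Pre_ (Python's keys[0] raises IndexError)
    | k0 :: _ =>
      let date_col := (keys.find? pvPredDate).getD k0
      rows.foldl
        (fun acc row =>
          let val := PySem.Str.strip ((PySem.Dict.ofList row).getD col_name "")
          if !(val == "" || val == "na" || val == "n/a" || val == "-") then
            (some val, some (if date_col != "" then PySem.Str.strip ((PySem.Dict.ofList row).getD date_col "") else ""))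
          else acc)
        (none, none)

-- ===== PRECONDITION & SPEC =====
-- Pre_ excludes only nonempty inputs whose FIRST row is the empty dict: there both
-- Pythons raise IndexError (A on list(rows[0].keys())[0], B on keys[0]).
def Pre_last_valid_value_py (rows : List (List (String × String))) (col_name : String) : Prop :=
  rows = [] ∨ rows.headD [] ≠ []
instance (rows : List (List (String × String))) (col_name : String) : Decidable (Pre_last_valid_value_py rows col_name) := by unfold Pre_last_valid_value_py; infer_instance

def pvWitness_last_valid_value_py : (List (List (String × String))) × String :=
  ([[("Date", "2020-01-01"), ("x", "5")]], "x")

def Spec_last_valid_value_py (rows : List (List (String × String))) (col_name : String) (out : Option String × Option String) : Prop := out = last_valid_value_py_alt rows col_name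
instance (rows : List (List (String × String))) (col_name : String) (out : Option String × Option String) : Decidable (Spec_last_valid_value_py rows col_name out) := by unfold Spec_last_valid_value_py; infer_instance

-- ===== CLAIM (what is proved, stated in full; the proofs are below) =====
def Claim_equal_last_valid_value_py : Prop := ∀ (rows : List (List (String × String))) (col_name : String), Dom_last_valid_value_py rows col_name → Pre_last_valid_value_py rows col_name → Spec_last_valid_value_py rows col_name (last_valid_value_py rows col_name)

-- ===== LEMMAS AND PROOFS =====

-- proof-side names for the loop-body condition and output
def pvCond (col_name : String) (row : List (String × String)) : Bool :=
  !(PySem.Str.strip ((PySem.Dict.ofList row).getD col_name "") == ""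
    || PySem.Str.strip ((PySem.Dict.ofList row).getD col_name "") == "na"
    || PySem.Str.strip ((PySem.Dict.ofList row).getD col_name "") == "n/a"
    || PySem.Str.strip ((PySem.Dict.ofList row).getD col_name "") == "-")

def pvOut (col_name dc : String) (row : List (String × String)) : Option String × Option String :=
  (some (PySem.Str.strip ((PySem.Dict.ofList row).getD col_name "")),
   some (if dc != "" then PySem.Str.strip ((PySem.Dict.ofList row).getD dc "") else ""))

theorem findDateColA_eq_find? (l : List String) : findDateColA l = l.find? pvPredDate := by
  induction l with
  | nil => rfl
  | cons k rest ih =>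
    simp only [findDateColA, List.find?]
    cases h : pvPredDate k <;> simp [ih]

theorem pvOut_fst_isSome (col_name dc : String) (row : List (String × String)) :
    (pvOut col_name dc row).1.isSome = true := rfl

theorem aLoop_fst_none (col_name dc : String) (l : List (List (String × String)))
    (hn : (aLoop (pvCond col_name) (pvOut col_name dc) l).1 = none) :
    aLoop (pvCond col_name) (pvOut col_name dc) l = (none, none) := by
  induction l with
  | nil => rfl
  | cons r rest ih =>
    rw [aLoop] at hn ⊢
    cases hc : pvCond col_name r with
    | true =>
      rw [hc, if_pos rfl] at hn
      have := pvOut_fst_isSome col_name dc r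
      rw [hn] at this
      simp at this
    | false =>
      rw [hc] at hn
      rw [if_neg Bool.false_ne_true] at hn ⊢
      exact ih hn

theorem aLoop_append (col_name dc : String) (xs ys : List (List (String × String))) :
    aLoop (pvCond col_name) (pvOut col_name dc) (xs ++ ys)
      = if (aLoop (pvCond col_name) (pvOut col_name dc) xs).1.isSome then
          aLoop (pvCond col_name) (pvOut col_name dc) xs
        else aLoop (pvCond col_name) (pvOut col_name dc) ys := by
  induction xs with
  | nil => simp [aLoop]
  | cons r rest ih =>
    simp only [List.cons_append, aLoop]
    cases hc : pvCond col_name r with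
    | true => simp [pvOut_fst_isSome]
    | false => simp [ih]

theorem foldl_eq_aLoop (col_name dc : String) (l : List (List (String × String)))
    (a : Option String × Option String) :
    l.foldl (fun acc r => if pvCond col_name r then pvOut col_name dc r else acc) a
      = if (aLoop (pvCond col_name) (pvOut col_name dc) l.reverse).1.isSome then
          aLoop (pvCond col_name) (pvOut col_name dc) l.reverse
        else a := by
  induction l generalizing a with
  | nil => simp [aLoop]
  | cons r rest ih =>
    simp only [List.foldl_cons, List.reverse_cons]
    rw [ih, aLoop_append]
    cases hrev : (aLoop (pvCond col_name) (pvOut col_name dc) rest.reverse).1.isSome with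
    | true => simp [hrev]
    | false =>
      simp only [Bool.false_eq_true, if_false]
      cases hc : pvCond col_name r with
      | true => simp [aLoop, hc, pvOut_fst_isSome]
      | false => simp [aLoop, hc]

theorem str_cond_eq (v : String) :
    (v != "" && !(v == "" || v == "na" || v == "n/a" || v == "-"))
      = !(v == "" || v == "na" || v == "n/a" || v == "-") := by
  cases h : v == "" <;> simp [bne, h]

-- A's loop condition ('val and val not in …') equals B's ('val not in …')
theorem acond_eq_pvCond (col_name : String) :
    (fun row : List (String × String) =>
      let val := PySem.Str.strip ((PySem.Dict.ofList row).getD col_name "")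
      val != "" && !(val == "" || val == "na" || val == "n/a" || val == "-"))
    = pvCond col_name := by
  funext row
  exact str_cond_eq _

theorem keys_ofList_ne_nil (p : String × String) (rp : List (String × String)) :
    (PySem.Dict.ofList (p :: rp) : PySem.Dict String String).keys ≠ [] := by
  have hsub : ∀ (l : List (String × String)) (d : PySem.Dict String String) (k : String),
      k ∈ d.keys → k ∈ (l.foldl (fun d q => d.insert q.1 q.2) d).keys := by
    intro l
    induction l with
    | nil => intro d k hk; simpa using hk
    | cons q lq ihq =>
      intro d k hk
      exact ihq _ k (by simp [PySem.Dict.mem_keys_insert, hk])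
  intro hk
  have hm : p.1 ∈ (PySem.Dict.ofList (p :: rp) : PySem.Dict String String).keys := by
    simp only [PySem.Dict.ofList, PySem.Dict.update, List.foldl_cons]
    exact hsub rp _ _ (by simp [PySem.Dict.mem_keys_insert])
  rw [hk] at hm
  simp at hm

-- the common tail: both loops agree once the date columns agree
theorem loops_agree (col_name dc : String) (rows : List (List (String × String))) :
    aLoop
      (fun row : List (String × String) =>
        let val := PySem.Str.strip ((PySem.Dict.ofList row).getD col_name "")
        val != "" && !(val == "" || val == "na" || val == "n/a" || val == "-"))
      (pvOut col_name dc) rows.reverse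
    = rows.foldl (fun acc row => if pvCond col_name row then pvOut col_name dc row else acc)
        (none, none) := by
  rw [acond_eq_pvCond, foldl_eq_aLoop]
  cases hrev : (aLoop (pvCond col_name) (pvOut col_name dc) rows.reverse).1.isSome with
  | true => rw [if_pos (by simp [hrev])]
  | false =>
    rw [if_neg (by simp [hrev])]
    exact aLoop_fst_none col_name dc _ (by simpa using hrev)

theorem last_valid_value_py_spec : Claim_equal_last_valid_value_py := by
  intro rows col_name _hdom hpre
  unfold Spec_last_valid_value_py
  match rows with
  | [] => rfl
  | r0 :: rest =>
    have hr0 : r0 ≠ [] := by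
      rcases hpre with h | h
      · exact absurd h (by simp)
      · simpa using h
    obtain ⟨p, rp, rfl⟩ : ∃ p rp, r0 = p :: rp := by
      cases r0 with
      | nil => exact absurd rfl hr0
      | cons p rp => exact ⟨p, rp, rfl⟩
    obtain ⟨k0, ks, hk⟩ :
        ∃ k0 ks, (PySem.Dict.ofList (p :: rp) : PySem.Dict String String).keys = k0 :: ks := by
      cases hkk : (PySem.Dict.ofList (p :: rp) : PySem.Dict String String).keys with
      | nil => exact absurd hkk (keys_ofList_ne_nil p rp)
      | cons k0 ks => exact ⟨k0, ks, rfl⟩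
    show last_valid_value_py ((p :: rp) :: rest) col_name
        = last_valid_value_py_alt ((p :: rp) :: rest) col_name
    rw [last_valid_value_py, last_valid_value_py_alt]
    simp only [hk, findDateColA_eq_find?]
    cases hfind : (k0 :: ks).find? pvPredDate with
    | some dc =>
      simp only [Option.getD_some]
      exact loops_agree col_name dc (((p :: rp)) :: rest)
    | none =>
      simp only [Option.getD_none, PySem.List.pyGet?_zero_cons]
      exact loops_agree col_name k0 (((p :: rp)) :: rest)
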